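-- pv_equiv track=rewrite | github.com/an-bruh/processamento-da-informacao | ep-avaliativo/Lista 8/Q4.py | verificaPermutavel
-- ===== SOURCE A (Python) =====
-- def verificaPermutavel(m):
--   for j in range(len(m[0])):
--     existe = [False]*len(m)
--     for i in range(len(m)):
--       for x in range(len(m)):
--         if m[i][j] == x:
--           existe[x] = True
--     for a in existe:
--       if not a:
--         return "NAO"
--   return "SIM"
-- ===== SOURCE B (Python) =====
-- def verificaPermutavel(m):
--     alvo = list(range(len(m)))
--     for j in range(len(m[0])):
--         if sorted(row[j] for row in m) != alvo:
--             return "NAO"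
--     return "SIM"
-- ===== Notes on version B (the rewrite author's own statement) =====
-- stated objective: faster
-- what changed: B extracts each column, sorts it and compares with list(range(n)) (a column of n entries contains every value 0..n-1 iff its sorted form is exactly 0..n-1), instead of A's per-value inner scan that marks a presence table.
import Mathlib
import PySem

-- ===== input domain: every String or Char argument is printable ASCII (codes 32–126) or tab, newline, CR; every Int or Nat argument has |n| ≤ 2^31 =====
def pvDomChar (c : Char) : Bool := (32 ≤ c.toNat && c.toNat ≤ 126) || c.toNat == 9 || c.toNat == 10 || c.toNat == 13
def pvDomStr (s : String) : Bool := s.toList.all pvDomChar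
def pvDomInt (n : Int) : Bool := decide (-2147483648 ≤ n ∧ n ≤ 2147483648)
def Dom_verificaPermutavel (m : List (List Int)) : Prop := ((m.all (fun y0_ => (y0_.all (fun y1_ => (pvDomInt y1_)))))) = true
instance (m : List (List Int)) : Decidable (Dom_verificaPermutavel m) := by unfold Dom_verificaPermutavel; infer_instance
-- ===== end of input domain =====

-- B sorts each column and compares it with list(range(n)) instead of A's per-value inner
-- scan marking a presence table; asymptotically faster (O(cols*n log n) vs O(cols*n^2)).

-- ===== PORT A =====
-- inner loop: for x in range(len(m)): if m[i][j] == x: existe[x] = True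
def pvA_inner (n : Nat) (v : Int) (e : List Bool) : List Bool :=
  (PySem.List.pyRange 0 (n : Int) 1).foldl
    (fun e x => if v = x then e.set x.toNat true else e) e

-- one column j: existe after the i-loop
def pvA_col (m : List (List Int)) (j : Int) : List Bool :=
  (PySem.List.pyRange 0 (m.length : Int) 1).foldl
    (fun e i => pvA_inner m.length (PySem.List.pyGetD (PySem.List.pyGetD m i []) j 0) e)
    (List.replicate m.length false)

-- the j-loop with early return "NAO"
def pvA_go (m : List (List Int)) (cols : Nat) (j : Nat) : String :=
  if _h : j < cols then
    (if (pvA_col m (j : Int)).all (fun a => a) then pvA_go m cols (j + 1) else "NAO")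
  else "SIM"
termination_by cols - j

def verificaPermutavel (m : List (List Int)) : String :=
  pvA_go m (m.headD []).length 0

-- ===== PORT B =====
-- the column j as a list: [row[j] for row in m]
def pvB_col (m : List (List Int)) (j : Int) : List Int :=
  m.map (fun row => PySem.List.pyGetD row j 0)

-- the j-loop: sorted(column) compared with alvo = list(range(len(m)))
def pvB_go (m : List (List Int)) (alvo : List Int) (cols : Nat) (j : Nat) : String :=
  if _h : j < cols then
    (if PySem.List.sorted (pvB_col m (j : Int)) (fun x => x) false = alvo then
        pvB_go m alvo cols (j + 1)
      else "NAO")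
  else "SIM"
termination_by cols - j

def verificaPermutavel_alt (m : List (List Int)) : String :=
  pvB_go m (PySem.List.pyRange 0 (m.length : Int) 1) (m.headD []).length 0

-- ===== PRECONDITION & SPEC =====
-- Pre_ excludes exactly the inputs on which A raises IndexError (and B raises identically):
-- empty m, and ragged inputs on which every column reached before a short-row access is a
-- permutation; every input on which A returns a value (including ragged inputs on which A
-- returns "NAO" at a fully-present bad column) satisfies Pre_.
def Pre_verificaPermutavel (m : List (List Int)) : Prop :=
  m ≠ [] ∧
    ((∀ r ∈ m, (m.headD []).length ≤ r.length) ∨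
      ∃ j ∈ List.range (m.headD []).length,
        (∀ r ∈ m, j < r.length) ∧
          ∃ x ∈ List.range m.length, ∀ r ∈ m, r.getD j 0 ≠ (x : Int))
instance (m : List (List Int)) : Decidable (Pre_verificaPermutavel m) := by
  unfold Pre_verificaPermutavel; infer_instance
def pvWitness_verificaPermutavel : List (List Int) := [[1, 0], [0, 1]]
def Spec_verificaPermutavel (m : List (List Int)) (out : String) : Prop := out = verificaPermutavel_alt m
instance (m : List (List Int)) (out : String) : Decidable (Spec_verificaPermutavel m out) := by unfold Spec_verificaPermutavel; infer_instance

-- ===== CLAIM (what is proved, stated in full; the proofs are below) =====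
def Claim_equal_verificaPermutavel : Prop := ∀ (m : List (List Int)), Dom_verificaPermutavel m → Pre_verificaPermutavel m → Spec_verificaPermutavel m (verificaPermutavel m)

-- ===== LEMMAS AND PROOFS =====

-- marking step of A, after pvA_inner_eq collapses the inner scan
def pvMark (n : Nat) (e : List Bool) (v : Int) : List Bool :=
  if 0 ≤ v ∧ v < (n : Int) then e.set v.toNat true else e

-- A's inner scan over range(n) is exactly a bounds-checked direct set.
theorem pvA_inner_eq (n : Nat) (v : Int) (e : List Bool) :
    pvA_inner n v e = pvMark n e v := by
  unfold pvMark
  induction n with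
  | zero =>
      simp [pvA_inner, PySem.List.pyRange_one_eq_nil (by omega : (0:Int) ≤ 0)]
  | succ n ih =>
      have hle : (0 : Int) ≤ (n : Int) := by positivity
      have : ((n + 1 : Nat) : Int) = (n : Int) + 1 := by push_cast; ring
      rw [pvA_inner, this, PySem.List.pyRange_one_succ_right hle, List.foldl_append]
      rw [show ((PySem.List.pyRange 0 (n : Int) 1).foldl
            (fun e x => if v = x then e.set x.toNat true else e) e) = pvA_inner n v e from rfl, ih]
      by_cases hv : v = (n : Int)
      · subst hv
        rw [if_neg (by omega), List.foldl_cons, List.foldl_nil, if_pos rfl,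
            if_pos (by constructor <;> omega)]
      · rw [List.foldl_cons, List.foldl_nil, if_neg hv]
        by_cases h1 : 0 ≤ v ∧ v < (n : Int)
        · rw [if_pos h1, if_pos (by omega)]
        · rw [if_neg h1, if_neg (by omega)]

theorem pvMark_length (n : Nat) (col : List Int) (e : List Bool) :
    (col.foldl (pvMark n) e).length = e.length := by
  induction col generalizing e with
  | nil => rfl
  | cons v col ih =>
      rw [List.foldl_cons, ih]
      unfold pvMark; split_ifs <;> simp

theorem pvMark_getD (n : Nat) (col : List Int) (e : List Bool) (k : Nat)
    (he : e.length = n) (hk : k < n) :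
    (col.foldl (pvMark n) e).getD k false = (e.getD k false || decide ((k : Int) ∈ col)) := by
  induction col generalizing e with
  | nil => simp
  | cons v col ih =>
      rw [List.foldl_cons, ih _ (by unfold pvMark; split_ifs <;> simp [he])]
      have hstep : (pvMark n e v).getD k false = (e.getD k false || decide (v = (k : Int))) := by
        unfold pvMark
        by_cases hv : 0 ≤ v ∧ v < (n : Int)
        · rw [if_pos hv]
          by_cases hvk : v = (k : Int)
          · subst hvk
            simp [List.getD_eq_getElem?_getD, he, hk, Int.toNat_natCast]
          · have : v.toNat ≠ k := by omega
            simp [List.getD_eq_getElem?_getD, List.getElem?_set_ne this, hvk]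
        · rw [if_neg hv]
          have : v ≠ (k : Int) := by omega
          simp [this]
      rw [hstep]
      simp [List.mem_cons, eq_comm, Bool.or_assoc]

-- A's all-marked check says: every value 0..n-1 occurs in the column.
theorem pvMark_all_iff (n : Nat) (col : List Int) :
    ((col.foldl (pvMark n) (List.replicate n false)).all (fun a => a) = true) ↔
      ∀ k < n, (k : Int) ∈ col := by
  rw [List.all_eq_true]
  constructor
  · intro h k hk
    have hm : (col.foldl (pvMark n) (List.replicate n false)).getD k false = true := by
      apply h
      have hlen : (col.foldl (pvMark n) (List.replicate n false)).length = n := by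
        rw [pvMark_length]; simp
      have : k < (col.foldl (pvMark n) (List.replicate n false)).length := by omega
      rw [List.getD_eq_getElem _ _ this]
      exact List.getElem_mem this
    rw [pvMark_getD n col _ k (by simp) hk] at hm
    simpa using hm
  · intro h a ha
    obtain ⟨k, hk, rfl⟩ := List.mem_iff_getElem.mp ha
    have hlen : (col.foldl (pvMark n) (List.replicate n false)).length = n := by
      rw [pvMark_length]; simp
    rw [← List.getD_eq_getElem _ false hk, pvMark_getD n col _ k (by simp) (by omega)]
    simp [h k (by omega)]

-- For a column of n entries: all of 0..n-1 present ↔ sorted column = range(n).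
theorem pv_sorted_iff (n : Nat) (col : List Int) (hlen : col.length = n) :
    (∀ k < n, (k : Int) ∈ col) ↔
      PySem.List.sorted col (fun x => x) false = PySem.List.pyRange 0 (n : Int) 1 := by
  constructor
  · intro h
    apply PySem.List.sorted_eq_of_perm_of_pairwise_lt
    · have hsub : PySem.List.pyRange 0 (n : Int) 1 ⊆ col := by
        intro x hx
        rw [PySem.List.mem_pyRange_one] at hx
        have : ((x.toNat : Nat) : Int) = x := by omega
        rw [← this]
        exact h x.toNat (by omega)
      have hsp := (PySem.List.nodup_pyRange_one (a := 0) (b := (n : Int))).subperm hsub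
      apply hsp.perm_of_length_le
      rw [PySem.List.length_pyRange_one, hlen]; omega
    · exact PySem.List.pairwise_lt_pyRange_one 0 (n : Int)
  · intro h k hk
    have hperm : (PySem.List.sorted col (fun x => x) false).Perm col :=
      PySem.List.sorted_perm col _ false
    rw [h] at hperm
    exact hperm.mem_iff.mp (PySem.List.mem_pyRange_one.mpr (by omega))

-- A's column marking equals the fold of pvMark over B's column list.
theorem pvA_col_eq (m : List (List Int)) (j : Int) :
    pvA_col m j = (pvB_col m j).foldl (pvMark m.length) (List.replicate m.length false) := by
  unfold pvA_col pvB_col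
  rw [show ((m.length : Int)) = PySem.List.len m from by simp [PySem.List.len_eq]]
  rw [PySem.List.foldl_pyRange_zero_pyGetD m ([] : List Int)
      (fun e row => pvA_inner m.length (PySem.List.pyGetD row j 0) e)
      (List.replicate m.length false)]
  rw [List.foldl_map]
  apply PySem.List.foldl_congr_mem
  intro acc x _
  exact pvA_inner_eq _ _ _

-- the two column checks agree
theorem pv_check_eq (m : List (List Int)) (j : Int) :
    ((pvA_col m (j : Int)).all (fun a => a) = true) ↔
      PySem.List.sorted (pvB_col m j) (fun x => x) false =
        PySem.List.pyRange 0 (m.length : Int) 1 := by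
  rw [pvA_col_eq, pvMark_all_iff]
  exact pv_sorted_iff m.length (pvB_col m j) (by simp [pvB_col])

theorem pv_go_eq (m : List (List Int)) (cols : Nat) :
    ∀ (k j : Nat), cols - j = k →
      pvA_go m cols j = pvB_go m (PySem.List.pyRange 0 (m.length : Int) 1) cols j := by
  intro k
  induction k with
  | zero =>
      intro j hj
      rw [pvA_go, pvB_go, dif_neg (by omega), dif_neg (by omega)]
  | succ k ih =>
      intro j hj
      rw [pvA_go, pvB_go, dif_pos (by omega), dif_pos (by omega)]
      by_cases h : PySem.List.sorted (pvB_col m (j : Int)) (fun x => x) false =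
          PySem.List.pyRange 0 (m.length : Int) 1
      · rw [if_pos ((pv_check_eq m (j : Int)).mpr h), if_pos h, ih (j + 1) (by omega)]
      · rw [if_neg (fun hc => h ((pv_check_eq m (j : Int)).mp (by simpa using hc))), if_neg h]

-- ===== VERDICT (by name: the statement is the Claim_ definition above) =====
theorem verificaPermutavel_spec : Claim_equal_verificaPermutavel := by
  intro m _ _
  show verificaPermutavel m = verificaPermutavel_alt m
  exact pv_go_eq m (m.headD []).length _ 0 rfl
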